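-- pv_equiv track=rewrite | github.com/riscv/riscv-isac | riscv_isac/coverage.py | gen_report
-- ===== SOURCE A (Python) =====
-- def gen_report(cgf, detailed):
--     '''
--     Function to convert a CGF to a string report. A detailed report includes the individual coverpoints and the corresponding values of the same
--
--     :param cgf: an input CGF dictionary
--     :param detailed: boolean value indicating a detailed report must be generated.
--
--     :type cgf: dict
--     :type detailed: bool
--
--     :return: string holding the final report
--     '''
--     rpt_str = ''
--     for cov_labels, value in cgf.items():
--         if cov_labels != 'datasets':
--             rpt_str += cov_labels + ':\n'
--             total_uncovered = 0
--             total_categories = 0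
--             for categories in value:
--                 if categories not in ['cond','config','ignore']:
--                     for coverpoints, coverage in value[categories].items():
--                         if coverage == 0:
--                             total_uncovered += 1
--                     total_categories += len(value[categories])
--             rpt_str += '  coverage: '+str(total_categories -total_uncovered) + \
--                     '/' + str(total_categories)+'\n'
--             for categories in value:
--                 if categories not in ['cond','config','ignore']:
--                     uncovered = 0
--                     for coverpoints, coverage in value[categories].items():
--                         if coverage == 0:
--                             uncovered += 1
--                     percentage_covered = str((len(value[categories]) - uncovered)/len(value[categories]))
--                     node_level_str =  '  ' + categories + ':\n'
--                     node_level_str += '    coverage: ' + \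
--                             str(len(value[categories]) - uncovered) + \
--                             '/' + str(len(value[categories]))
--                     rpt_str += node_level_str + '\n'
--                     if detailed:
--                         rpt_str += '    detail:\n'
--                         for coverpoints in value[categories]:
--                             rpt_str += '      - '+str(coverpoints) + ': ' + str(value[categories][coverpoints]) + '\n'
--     return rpt_str
-- ===== SOURCE B (Python) =====
-- def gen_report(cgf, detailed):
--     # Single pass per label: totals and the per-category block lines are
--     # accumulated together in one traversal, then joined at the end.
--     out = []
--     for label, value in cgf.items():
--         if label == 'datasets':
--             continue
--         covered = 0
--         total = 0
--         blocks = []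
--         for cat, cps in value.items():
--             if cat in ('cond', 'config', 'ignore'):
--                 continue
--             n = len(cps)
--             unc = len([v for v in cps.values() if v == 0])
--             covered += n - unc
--             total += n
--             blocks.append('  ' + cat + ':\n    coverage: ' + str(n - unc) + '/' + str(n) + '\n')
--             if detailed:
--                 blocks.append('    detail:\n')
--                 blocks.extend('      - ' + cp + ': ' + str(cov) + '\n' for cp, cov in cps.items())
--         out.append(label + ':\n')
--         out.append('  coverage: ' + str(covered) + '/' + str(total) + '\n')
--         out.extend(blocks)
--     return ''.join(out)
-- ===== Notes on version B (the rewrite author's own statement) =====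
-- stated objective: simpler
-- what changed: Per label, A's two separate passes over the categories (one for the totals, one to emit the blocks) are fused into a single pass that keeps running covered/total counters while buffering the block lines in a list, emitted once with ''.join; the unused per-category float division is dropped.
-- crash fix: On inputs where some non-'datasets' label has a non-skipped category with an empty coverpoint dict, A raises ZeroDivisionError (its unused percentage_covered division); B returns the report with that category shown as 'coverage: 0/0'. — e.g. on gen_report([("l", [("a", [])])], false): A raises ZeroDivisionError, B returns "l:\n coverage: 0/0\n a:\n coverage: 0/0\n"
import Mathlib
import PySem

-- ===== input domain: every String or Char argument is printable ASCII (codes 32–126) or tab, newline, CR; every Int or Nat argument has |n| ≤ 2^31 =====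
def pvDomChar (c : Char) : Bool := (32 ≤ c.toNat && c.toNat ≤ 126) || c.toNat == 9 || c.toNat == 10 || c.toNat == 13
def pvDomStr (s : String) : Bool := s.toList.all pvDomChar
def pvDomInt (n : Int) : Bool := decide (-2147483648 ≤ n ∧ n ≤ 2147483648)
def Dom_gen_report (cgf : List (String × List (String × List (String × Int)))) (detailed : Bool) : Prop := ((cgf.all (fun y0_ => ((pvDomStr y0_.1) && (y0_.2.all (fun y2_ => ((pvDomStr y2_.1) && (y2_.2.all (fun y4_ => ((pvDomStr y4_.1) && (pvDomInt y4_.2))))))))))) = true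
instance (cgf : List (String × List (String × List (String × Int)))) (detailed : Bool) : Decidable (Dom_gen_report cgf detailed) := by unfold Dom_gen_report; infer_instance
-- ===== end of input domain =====

-- B merges A's two passes over each label's categories into a single pass that keeps
-- running covered/total counters while buffering the per-category block lines, then
-- joins header + buffer once (objective: simpler/alternative decomposition, same cost).


-- ===== PORT A =====
-- `categories not in ['cond','config','ignore']` membership test
def pvA_skip (c : String) : Bool := c == "cond" || c == "config" || c == "ignore"

-- literal transliteration of A: per label, first pass computes the totals, the header is
-- appended, then a second pass re-counts each category and appends its block to rpt_str.
-- (A's unused `percentage_covered` float division is not representable; on empty category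
-- dicts Python A raises ZeroDivisionError there — those inputs are excluded by Pre_.)
def gen_report (cgf : List (String × List (String × List (String × Int)))) (detailed : Bool) : String :=
  cgf.foldl (fun rpt lv =>
    if lv.1 == "datasets" then rpt else
      let rpt := rpt ++ lv.1 ++ ":\n"
      let tt : Int × Int := lv.2.foldl (fun (s : Int × Int) cv =>
          if pvA_skip cv.1 then s
          else (cv.2.foldl (fun tu pr => if pr.2 == 0 then tu + 1 else tu) s.1,
                s.2 + (cv.2.length : Int))) (0, 0)
      let rpt := rpt ++ "  coverage: " ++ PySem.Int.toStr (tt.2 - tt.1) ++ "/" ++ PySem.Int.toStr tt.2 ++ "\n"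
      lv.2.foldl (fun rpt cv =>
        if pvA_skip cv.1 then rpt else
          let unc : Int := cv.2.foldl (fun u pr => if pr.2 == 0 then u + 1 else u) 0
          let node := "  " ++ cv.1 ++ ":\n" ++ "    coverage: " ++
              PySem.Int.toStr ((cv.2.length : Int) - unc) ++ "/" ++ PySem.Int.toStr (cv.2.length : Int)
          let rpt := rpt ++ node ++ "\n"
          if detailed then
            cv.2.foldl (fun r pr => r ++ "      - " ++ pr.1 ++ ": " ++ PySem.Int.toStr pr.2 ++ "\n")
              (rpt ++ "    detail:\n")
          else rpt) rpt) ""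

-- ===== PORT B =====
-- B's single pass over one label's categories: running (covered, total, block buffer)
def pvB_cat (detailed : Bool) (st : Int × Int × List String)
    (cv : String × List (String × Int)) : Int × Int × List String :=
  if cv.1 == "cond" || cv.1 == "config" || cv.1 == "ignore" then st else
    let n : Int := cv.2.length
    let unc : Int := ((cv.2.map (fun pr => pr.2)).filter (fun v => v == 0)).length
    (st.1 + (n - unc), st.2.1 + n,
     st.2.2 ++ ["  " ++ cv.1 ++ ":\n    coverage: " ++ PySem.Int.toStr (n - unc) ++ "/" ++ PySem.Int.toStr n ++ "\n"]
       ++ (if detailed then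
             "    detail:\n" :: cv.2.map (fun pr => "      - " ++ pr.1 ++ ": " ++ PySem.Int.toStr pr.2 ++ "\n")
           else []))

def gen_report_alt (cgf : List (String × List (String × List (String × Int)))) (detailed : Bool) : String :=
  String.join (cgf.foldl (fun out lv =>
    if lv.1 == "datasets" then out else
      let st := lv.2.foldl (pvB_cat detailed) (0, 0, [])
      out ++ [lv.1 ++ ":\n", "  coverage: " ++ PySem.Int.toStr st.1 ++ "/" ++ PySem.Int.toStr st.2.1 ++ "\n"] ++ st.2.2) [])

-- ===== PRECONDITION & SPEC =====
-- Pre_ excludes inputs where some non-'datasets' label has a non-skipped category with an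
-- empty coverpoint dict: there Python A raises ZeroDivisionError (its unused
-- percentage_covered division), so A returns normally exactly on Pre_.
def Pre_gen_report (cgf : List (String × List (String × List (String × Int)))) (detailed : Bool) : Prop :=
  ∀ lv ∈ cgf, lv.1 ≠ "datasets" →
    ∀ cv ∈ lv.2, ¬(cv.1 = "cond" ∨ cv.1 = "config" ∨ cv.1 = "ignore") → cv.2 ≠ []
instance (cgf : List (String × List (String × List (String × Int)))) (detailed : Bool) : Decidable (Pre_gen_report cgf detailed) := by unfold Pre_gen_report; infer_instance
def pvWitness_gen_report : (List (String × List (String × List (String × Int)))) × Bool :=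
  ([("add", [("opcode", [("rs1", 2), ("rs2", 0)]), ("cond", [])])], true)

-- On inputs with a non-skipped empty category dict under a non-'datasets' label, A raises
-- ZeroDivisionError while B returns the report with that category shown as covered 0/0.
def Raises_gen_report (cgf : List (String × List (String × List (String × Int)))) (detailed : Bool) : Prop :=
  ∃ lv ∈ cgf, lv.1 ≠ "datasets" ∧
    ∃ cv ∈ lv.2, ¬(cv.1 = "cond" ∨ cv.1 = "config" ∨ cv.1 = "ignore") ∧ cv.2 = []
instance (cgf : List (String × List (String × List (String × Int)))) (detailed : Bool) : Decidable (Raises_gen_report cgf detailed) := by unfold Raises_gen_report; infer_instance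
def pvRaiseWitness_gen_report : (List (String × List (String × List (String × Int)))) × Bool :=
  ([("l", [("a", [])])], false)
def pvRaiseWitnessOut_gen_report : String := "l:\n  coverage: 0/0\n  a:\n    coverage: 0/0\n"

def Spec_gen_report (cgf : List (String × List (String × List (String × Int)))) (detailed : Bool) (out : String) : Prop := out = gen_report_alt cgf detailed
instance (cgf : List (String × List (String × List (String × Int)))) (detailed : Bool) (out : String) : Decidable (Spec_gen_report cgf detailed out) := by unfold Spec_gen_report; infer_instance

-- ===== CLAIM (what is proved, stated in full; the proofs are below) =====
def Claim_equal_gen_report : Prop := ∀ (cgf : List (String × List (String × List (String × Int)))) (detailed : Bool), Dom_gen_report cgf detailed → Pre_gen_report cgf detailed → Spec_gen_report cgf detailed (gen_report cgf detailed)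
def Claim_raises_gen_report : Prop := (∀ (cgf : List (String × List (String × List (String × Int)))) (detailed : Bool), Dom_gen_report cgf detailed → Raises_gen_report cgf detailed → ¬ Pre_gen_report cgf detailed) ∧ (Dom_gen_report (pvRaiseWitness_gen_report.1) (pvRaiseWitness_gen_report.2) ∧ Raises_gen_report (pvRaiseWitness_gen_report.1) (pvRaiseWitness_gen_report.2) ∧ gen_report_alt (pvRaiseWitness_gen_report.1) (pvRaiseWitness_gen_report.2) = pvRaiseWitnessOut_gen_report)

-- ===== LEMMAS AND PROOFS =====

-- spec helpers for the proof (recursive characterisations of both folds)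
def pvUnc (cps : List (String × Int)) : Int := ((cps.map (fun pr => pr.2)).filter (fun v => v == 0)).length

def pvBlks (d : Bool) : List (String × List (String × Int)) → List String
  | [] => []
  | cv :: t => (if pvA_skip cv.1 then [] else
      ("  " ++ cv.1 ++ ":\n    coverage: " ++ PySem.Int.toStr ((cv.2.length : Int) - pvUnc cv.2) ++ "/" ++ PySem.Int.toStr (cv.2.length : Int) ++ "\n")
        :: (if d then "    detail:\n" :: cv.2.map (fun pr => "      - " ++ pr.1 ++ ": " ++ PySem.Int.toStr pr.2 ++ "\n") else [])) ++ pvBlks d t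

def pvU : List (String × List (String × Int)) → Int
  | [] => 0
  | cv :: t => (if pvA_skip cv.1 then 0 else pvUnc cv.2) + pvU t

def pvC : List (String × List (String × Int)) → Int
  | [] => 0
  | cv :: t => (if pvA_skip cv.1 then 0 else (cv.2.length : Int)) + pvC t

lemma pv_join_cons (a : String) (l : List String) : String.join (a :: l) = a ++ String.join l := by
  have h : ∀ (l : List String) (s : String), l.foldl (· ++ ·) s = s ++ l.foldl (· ++ ·) "" := by
    intro l
    induction l with
    | nil => intro s; simp [List.foldl]
    | cons x t ih =>
        intro s; simp only [List.foldl]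
        rw [ih (s ++ x), ih ("" ++ x), String.append_assoc]
        simp
  simp only [String.join, List.foldl]
  rw [h l ("" ++ a)]; simp

lemma pv_join_nil : String.join ([] : List String) = "" := rfl

lemma pv_join_append (l₁ l₂ : List String) : String.join (l₁ ++ l₂) = String.join l₁ ++ String.join l₂ := by
  induction l₁ with
  | nil => simp [String.join]
  | cons a t ih => simp [pv_join_cons, ih, String.append_assoc]

-- literal-merge helpers
lemma pv_lit2 (x : String) : "\n" ++ ("    detail:\n" ++ x) = "\n    detail:\n" ++ x := by
  rw [← String.append_assoc]
  congr 1

lemma pv_lit3 (x : String) : ":\n" ++ ("  coverage: " ++ x) = ":\n  coverage: " ++ x := by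
  rw [← String.append_assoc]
  congr 1

-- A's inner uncovered-counting loop equals B's filter length (shifted accumulator)
lemma pv_unc_fold (cps : List (String × Int)) (a : Int) :
    cps.foldl (fun u pr => if pr.2 == 0 then u + 1 else u) a = a + pvUnc cps := by
  induction cps generalizing a with
  | nil => simp [pvUnc]
  | cons pr t ih =>
      rw [List.foldl_cons]
      by_cases h : pr.2 == 0
      · simp only [h, if_true]
        rw [ih]
        simp [pvUnc, h]
        omega
      · simp only [h, Bool.false_eq_true, if_false]
        rw [ih]
        simp [pvUnc, h]

-- A's first pass computed from an arbitrary start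
lemma pv_totals_fold (value : List (String × List (String × Int))) (u c : Int) :
    value.foldl (fun (s : Int × Int) cv =>
        if pvA_skip cv.1 then s
        else (cv.2.foldl (fun tu pr => if pr.2 == 0 then tu + 1 else tu) s.1,
              s.2 + (cv.2.length : Int))) (u, c) = (u + pvU value, c + pvC value) := by
  induction value generalizing u c with
  | nil => simp [pvU, pvC]
  | cons cv t ih =>
      rw [List.foldl_cons]
      by_cases h : pvA_skip cv.1
      · simp only [h, if_true]
        rw [ih]
        simp [pvU, pvC, h]
      · simp only [h, Bool.false_eq_true, if_false]
        rw [pv_unc_fold, ih]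
        simp only [pvU, pvC, h, Bool.false_eq_true, if_false]
        refine Prod.ext ?_ ?_ <;> simp <;> ring

-- A's detail sub-loop equals the join of B's detail lines
lemma pv_detail_fold (cps : List (String × Int)) (r : String) :
    cps.foldl (fun r pr => r ++ "      - " ++ pr.1 ++ ": " ++ PySem.Int.toStr pr.2 ++ "\n") r
      = r ++ String.join (cps.map (fun pr => "      - " ++ pr.1 ++ ": " ++ PySem.Int.toStr pr.2 ++ "\n")) := by
  induction cps generalizing r with
  | nil => simp [String.join]
  | cons pr t ih =>
      rw [List.foldl_cons, ih, List.map_cons, pv_join_cons]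
      simp [String.append_assoc]

-- A's second pass equals the join of B's buffered blocks
lemma pv_block_fold (d : Bool) (value : List (String × List (String × Int))) (r : String) :
    value.foldl (fun rpt cv =>
        if pvA_skip cv.1 then rpt else
          let unc : Int := cv.2.foldl (fun u pr => if pr.2 == 0 then u + 1 else u) 0
          let node := "  " ++ cv.1 ++ ":\n" ++ "    coverage: " ++
              PySem.Int.toStr ((cv.2.length : Int) - unc) ++ "/" ++ PySem.Int.toStr (cv.2.length : Int)
          let rpt := rpt ++ node ++ "\n"
          if d then
            cv.2.foldl (fun r pr => r ++ "      - " ++ pr.1 ++ ": " ++ PySem.Int.toStr pr.2 ++ "\n")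
              (rpt ++ "    detail:\n")
          else rpt) r
      = r ++ String.join (pvBlks d value) := by
  induction value generalizing r with
  | nil => simp [pvBlks, String.join]
  | cons cv t ih =>
      rw [List.foldl_cons, ih]
      by_cases h : pvA_skip cv.1
      · simp [pvBlks, h]
      · by_cases hd : d
        · simp only [h, Bool.false_eq_true, if_false, hd, if_true]
          rw [pv_unc_fold, pv_detail_fold]
          simp [pvBlks, h, pv_join_append, pv_join_cons, String.append_assoc, pv_lit2]
        · simp only [h, Bool.false_eq_true, if_false, hd]
          rw [pv_unc_fold]
          simp [pvBlks, h, pv_join_cons, String.append_assoc]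

-- B's single pass computed from an arbitrary state
lemma pv_bcat_fold (d : Bool) (value : List (String × List (String × Int))) (c t : Int) (bs : List String) :
    value.foldl (pvB_cat d) (c, t, bs) = (c + (pvC value - pvU value), t + pvC value, bs ++ pvBlks d value) := by
  induction value generalizing c t bs with
  | nil => simp [pvU, pvC, pvBlks]
  | cons cv tl ih =>
      rw [List.foldl_cons]
      have hskip : (cv.1 == "cond" || cv.1 == "config" || cv.1 == "ignore") = pvA_skip cv.1 := rfl
      by_cases h : pvA_skip cv.1
      · rw [show pvB_cat d (c, t, bs) cv = (c, t, bs) by simp [pvB_cat, hskip.symm ▸ h]]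
        rw [ih]
        simp [pvU, pvC, pvBlks, h]
      · rw [show pvB_cat d (c, t, bs) cv =
            (c + ((cv.2.length : Int) - pvUnc cv.2), t + (cv.2.length : Int),
             bs ++ (("  " ++ cv.1 ++ ":\n    coverage: " ++ PySem.Int.toStr ((cv.2.length : Int) - pvUnc cv.2) ++ "/" ++ PySem.Int.toStr (cv.2.length : Int) ++ "\n")
               :: (if d then "    detail:\n" :: cv.2.map (fun pr => "      - " ++ pr.1 ++ ": " ++ PySem.Int.toStr pr.2 ++ "\n") else []))) by
          simp [pvB_cat, hskip, h, pvUnc]]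
        rw [ih]
        simp only [pvU, pvC, pvBlks, h, Bool.false_eq_true, if_false]
        refine Prod.ext ?_ (Prod.ext ?_ ?_)
        · simp; ring
        · simp; ring
        · simp [List.append_assoc]

-- the text one label contributes, as A writes it / as B buffers it
def pvChunk (d : Bool) (lv : String × List (String × List (String × Int))) : List String :=
  if lv.1 == "datasets" then [] else
    [lv.1 ++ ":\n",
     "  coverage: " ++ PySem.Int.toStr (pvC lv.2 - pvU lv.2) ++ "/" ++ PySem.Int.toStr (pvC lv.2) ++ "\n"]
      ++ pvBlks d lv.2

lemma pv_outer_A (detailed : Bool) (cgf : List (String × List (String × List (String × Int)))) (r : String) :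
    cgf.foldl (fun rpt lv =>
      if lv.1 == "datasets" then rpt else
        let rpt := rpt ++ lv.1 ++ ":\n"
        let tt : Int × Int := lv.2.foldl (fun (s : Int × Int) cv =>
            if pvA_skip cv.1 then s
            else (cv.2.foldl (fun tu pr => if pr.2 == 0 then tu + 1 else tu) s.1,
                  s.2 + (cv.2.length : Int))) (0, 0)
        let rpt := rpt ++ "  coverage: " ++ PySem.Int.toStr (tt.2 - tt.1) ++ "/" ++ PySem.Int.toStr tt.2 ++ "\n"
        lv.2.foldl (fun rpt cv =>
          if pvA_skip cv.1 then rpt else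
            let unc : Int := cv.2.foldl (fun u pr => if pr.2 == 0 then u + 1 else u) 0
            let node := "  " ++ cv.1 ++ ":\n" ++ "    coverage: " ++
                PySem.Int.toStr ((cv.2.length : Int) - unc) ++ "/" ++ PySem.Int.toStr (cv.2.length : Int)
            let rpt := rpt ++ node ++ "\n"
            if detailed then
              cv.2.foldl (fun r pr => r ++ "      - " ++ pr.1 ++ ": " ++ PySem.Int.toStr pr.2 ++ "\n")
                (rpt ++ "    detail:\n")
            else rpt) rpt) r
    = r ++ String.join (cgf.flatMap (pvChunk detailed)) := by
  induction cgf generalizing r with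
  | nil => simp [pv_join_nil]
  | cons lv t ih =>
      rw [List.foldl_cons, ih]
      by_cases h : lv.1 == "datasets"
      · simp [pvChunk, h]
      · simp only [h, Bool.false_eq_true, if_false]
        rw [pv_totals_fold, pv_block_fold]
        simp only [List.flatMap_cons, pv_join_append, pvChunk, h, Bool.false_eq_true, if_false,
          List.cons_append, pv_join_cons, pv_join_append, zero_add]
        simp [String.append_assoc, pv_join_nil, pv_lit3]

lemma pv_outer_B (detailed : Bool) (cgf : List (String × List (String × List (String × Int)))) (out : List String) :
    cgf.foldl (fun out lv =>
      if lv.1 == "datasets" then out else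
        let st := lv.2.foldl (pvB_cat detailed) (0, 0, [])
        out ++ [lv.1 ++ ":\n", "  coverage: " ++ PySem.Int.toStr st.1 ++ "/" ++ PySem.Int.toStr st.2.1 ++ "\n"] ++ st.2.2) out
    = out ++ cgf.flatMap (pvChunk detailed) := by
  induction cgf generalizing out with
  | nil => simp
  | cons lv t ih =>
      simp only [List.foldl, List.flatMap_cons, pvChunk]
      by_cases h : lv.1 == "datasets"
      · rw [if_pos h, if_pos h, ih]; simp
      · rw [if_neg h, if_neg h]
        rw [pv_bcat_fold, ih]
        simp [List.append_assoc]

-- ===== VERDICT (by name: the statements are the Claim_ definitions above) =====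
theorem gen_report_spec : Claim_equal_gen_report := by
  intro cgf detailed _ _
  unfold Spec_gen_report gen_report gen_report_alt
  rw [pv_outer_A, pv_outer_B]
  simp

def gen_report_raises : Claim_raises_gen_report := by
  unfold Claim_raises_gen_report
  constructor
  · intro cgf d _ hr hp
    obtain ⟨lv, hlv, hne, cv, hcv, hns, hnil⟩ := hr
    exact hp lv hlv hne cv hcv hns hnil
  · exact ⟨by decide, by decide, by decide⟩
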